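-- pv_equiv track=rewrite | github.com/azevedoluan/Desafios | AnalisaSimulados.py | total_acertos_questoes
-- ===== SOURCE A (Python) =====
-- def total_acertos_questoes(valores):
--     lista_totais = []
--     intervalo = len(valores) - 3
--     soma_acertos = 0
--     soma_questoes = 0
--     for i in range(0, intervalo, 4):
--         soma_acertos = soma_acertos + (valores[i] + valores[i + 2])
--         soma_questoes = soma_questoes + (valores[i + 1] + valores[i + 3])
--     lista_totais.append(soma_acertos)
--     lista_totais.append(soma_questoes)
--     return lista_totais
-- ===== SOURCE B (Python) =====
-- def total_acertos_questoes(valores):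
--     m = len(valores) // 4 * 4
--     soma_acertos = 0
--     soma_questoes = 0
--     for i, v in enumerate(valores[:m]):
--         if i % 2 == 0:
--             soma_acertos += v
--         else:
--             soma_questoes += v
--     return [soma_acertos, soma_questoes]
-- ===== Notes on version B (the rewrite author's own statement) =====
-- stated objective: simpler
-- what changed: Instead of A's stride-4 index loop doing four subscript lookups per group, B truncates the list to its complete groups of four (len//4*4) and makes one element-wise pass, routing each value by the parity of its position: even positions are hits, odd positions are questions.
import Mathlib
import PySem

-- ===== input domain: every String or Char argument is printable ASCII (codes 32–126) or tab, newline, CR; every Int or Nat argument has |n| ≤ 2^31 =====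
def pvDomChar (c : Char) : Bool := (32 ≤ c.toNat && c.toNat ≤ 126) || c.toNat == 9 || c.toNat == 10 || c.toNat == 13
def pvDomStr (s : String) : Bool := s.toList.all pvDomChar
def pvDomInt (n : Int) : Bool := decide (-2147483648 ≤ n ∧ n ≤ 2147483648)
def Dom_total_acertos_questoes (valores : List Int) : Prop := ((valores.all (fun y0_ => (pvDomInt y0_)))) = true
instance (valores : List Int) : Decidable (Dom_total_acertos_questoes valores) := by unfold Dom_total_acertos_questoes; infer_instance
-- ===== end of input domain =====

-- B drops A's stride-4 index loop: it truncates to the complete groups of four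
-- (len // 4 * 4) and makes one element-wise pass, accumulating by position parity;
-- objective: simpler, same O(n) cost.

-- ===== PORT A =====
-- every index i, i+1, i+2, i+3 drawn from range(0, len-3, 4) is in range, so valores[..]
-- never raises; pyGetD's default 0 is never used.
def total_acertos_questoes (valores : List Int) : List Int :=
  let intervalo : Int := (valores.length : Int) - 3
  let s := (PySem.List.pyRange 0 intervalo 4).foldl
    (fun (s : Int × Int) i =>
      (s.1 + (PySem.List.pyGetD valores i 0 + PySem.List.pyGetD valores (i + 2) 0),
       s.2 + (PySem.List.pyGetD valores (i + 1) 0 + PySem.List.pyGetD valores (i + 3) 0)))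
    (0, 0)
  [s.1, s.2]

-- ===== PORT B =====
-- 'i % 2': the enumerate index i is ≥ 0, where Lean's % agrees with Python's %.
def total_acertos_questoes_alt (valores : List Int) : List Int :=
  let m : Int := PySem.Int.floordiv (valores.length : Int) 4 * 4
  let s := (PySem.List.enumerate (PySem.List.slice valores none (some m)) 0).foldl
    (fun (s : Int × Int) iv =>
      if iv.1 % 2 == 0 then (s.1 + iv.2, s.2) else (s.1, s.2 + iv.2))
    (0, 0)
  [s.1, s.2]

-- ===== PRECONDITION & SPEC =====
def Spec_total_acertos_questoes (valores : List Int) (out : List Int) : Prop := out = total_acertos_questoes_alt valores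
instance (valores : List Int) (out : List Int) : Decidable (Spec_total_acertos_questoes valores out) := by unfold Spec_total_acertos_questoes; infer_instance

-- ===== CLAIM (what is proved, stated in full; the proofs are below) =====
def Claim_equal_total_acertos_questoes : Prop := ∀ (valores : List Int), Dom_total_acertos_questoes valores → Spec_total_acertos_questoes valores (total_acertos_questoes valores)

-- ===== LEMMAS AND PROOFS =====

-- the common value both folds compute, grouped A's way (per quad, back to front)
def pairSums : List Int → Int × Int
  | a :: _b :: c :: _d :: rest => ((pairSums rest).1 + (a + c), (pairSums rest).2 + (_b + _d))
  | _ => (0, 0)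

-- quads-shaped induction skeleton (gives the 4-at-a-time case split)
def quads : List Int → List (Int × Int × Int × Int)
  | a :: b :: c :: d :: rest => (a, b, c, d) :: quads rest
  | _ => []

-- (sum of even positions, sum of odd positions)
def eo : List Int → Int × Int
  | [] => (0, 0)
  | a :: t => (a + (eo t).2, (eo t).1)

theorem pyRange4_cons (n : Nat) :
    PySem.List.pyRange 0 (((n : Int) + 4) - 3) 4
      = 0 :: (PySem.List.pyRange 0 ((n : Int) - 3) 4).map (· + 4) := by
  rw [PySem.List.pyRange_of_pos 0 (((n : Int) + 4) - 3) (by norm_num),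
      PySem.List.pyRange_of_pos 0 ((n : Int) - 3) (by norm_num)]
  have h1 : (if (0 : Int) < (n : Int) + 4 - 3 then ((((n : Int) + 4 - 3) - 0 + 4 - 1) / 4).toNat else 0)
      = (if (0 : Int) < (n : Int) - 3 then (((n : Int) - 3 - 0 + 4 - 1) / 4).toNat else 0) + 1 := by
    split_ifs <;> omega
  rw [h1, List.range_succ_eq_map, List.map_cons, List.map_map, List.map_map]
  congr 1

theorem pyRange4_nonneg {n : Nat} {i : Int} (h : i ∈ PySem.List.pyRange 0 ((n : Int) - 3) 4) : 0 ≤ i :=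
  ((PySem.List.mem_pyRange_iff_of_pos (by norm_num) i).1 h).1

theorem pyGetD_cons4 (a b c d : Int) (rest : List Int) (i : Int) (hi : 0 ≤ i) :
    PySem.List.pyGetD (a :: b :: c :: d :: rest) (i + 4) 0 = PySem.List.pyGetD rest i 0 := by
  rw [PySem.List.pyGetD_of_nonneg _ _ (by omega), PySem.List.pyGetD_of_nonneg _ _ hi]
  have h4 : (i + 4).toNat = i.toNat + 4 := by omega
  rw [h4]
  rfl

-- A's fold computes pairSums
theorem afold_eq (vs : List Int) (sa sq : Int) :
    (PySem.List.pyRange 0 ((vs.length : Int) - 3) 4).foldl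
      (fun (s : Int × Int) i =>
        (s.1 + (PySem.List.pyGetD vs i 0 + PySem.List.pyGetD vs (i + 2) 0),
         s.2 + (PySem.List.pyGetD vs (i + 1) 0 + PySem.List.pyGetD vs (i + 3) 0)))
      (sa, sq) = (sa + (pairSums vs).1, sq + (pairSums vs).2) := by
  induction vs using quads.induct generalizing sa sq with
  | case1 a b c d rest ih =>
      have hlen : ((a :: b :: c :: d :: rest).length : Int) - 3 = ((rest.length : Int) + 4) - 3 := by
        simp; omega
      rw [hlen, pyRange4_cons rest.length, List.foldl_cons, List.foldl_map]
      rw [PySem.List.foldl_congr_mem _ _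
        (fun (s : Int × Int) i =>
          (s.1 + (PySem.List.pyGetD rest i 0 + PySem.List.pyGetD rest (i + 2) 0),
           s.2 + (PySem.List.pyGetD rest (i + 1) 0 + PySem.List.pyGetD rest (i + 3) 0))) _
        (by
          intro acc x hx
          have hx0 : 0 ≤ x := pyRange4_nonneg hx
          have e0 := pyGetD_cons4 a b c d rest x hx0
          have e1 := pyGetD_cons4 a b c d rest (x + 1) (by omega)
          have e2 := pyGetD_cons4 a b c d rest (x + 2) (by omega)
          have e3 := pyGetD_cons4 a b c d rest (x + 3) (by omega)
          simp only []
          rw [show x + 4 + 1 = x + 1 + 4 by ring, show x + 4 + 2 = x + 2 + 4 by ring,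
              show x + 4 + 3 = x + 3 + 4 by ring, e0, e1, e2, e3])]
      rw [ih]
      simp only [pairSums]
      norm_num [PySem.List.pyGetD_ofNat']
      constructor <;> ring
  | case2 vs h =>
      have hlen : vs.length ≤ 3 := by
        rcases vs with _ | ⟨a, _ | ⟨b, _ | ⟨c, _ | ⟨d, t⟩⟩⟩⟩
        · simp
        · simp
        · simp
        · simp
        · exact ((h a b c d t rfl).elim : _)
      have hr : PySem.List.pyRange 0 ((vs.length : Int) - 3) 4 = [] := by
        rw [PySem.List.pyRange_of_pos 0 _ (by norm_num)]
        rw [if_neg (by omega)]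
        rfl
      have hp : pairSums vs = (0, 0) := by
        rcases vs with _ | ⟨a, _ | ⟨b, _ | ⟨c, _ | ⟨d, t⟩⟩⟩⟩
        · rfl
        · rfl
        · rfl
        · rfl
        · exact (h a b c d t rfl).elim
      simp [hr, hp]

-- B's parity fold computes eo (swapped when the starting index is odd)
theorem bfold_eq (l : List Int) (k : Int) (hk : 0 ≤ k) (sa sq : Int) :
    (PySem.List.enumerate l k).foldl
      (fun (s : Int × Int) iv =>
        if iv.1 % 2 == 0 then (s.1 + iv.2, s.2) else (s.1, s.2 + iv.2))
      (sa, sq)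
    = if k % 2 == 0 then (sa + (eo l).1, sq + (eo l).2)
      else (sa + (eo l).2, sq + (eo l).1) := by
  induction l generalizing k sa sq with
  | nil =>
      simp only [PySem.List.enumerate_nil, List.foldl_nil, eo]
      split_ifs <;> simp
  | cons a t ih =>
      rw [PySem.List.enumerate_cons, List.foldl_cons]
      by_cases hpar : k % 2 = 0
      · rw [if_pos (by simpa using hpar)]
        simp only [hpar]
        rw [ih (k + 1) (by omega)]
        rw [if_neg (by simp; omega), if_pos (by simp)]
        simp only [eo]
        rw [Prod.mk.injEq]
        exact ⟨by ring, by ring⟩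
      · rw [if_neg (by simpa using hpar)]
        rw [ih (k + 1) (by omega)]
        rw [if_pos (by simp; omega), if_neg (by simpa using hpar)]
        simp only [eo]
        rw [Prod.mk.injEq]
        exact ⟨by ring, by ring⟩

theorem take_m_quads (vs : List Int) :
    eo (vs.take (vs.length / 4 * 4)) = pairSums vs := by
  induction vs using quads.induct with
  | case1 a b c d rest ih =>
      have hlen : (a :: b :: c :: d :: rest).length / 4 * 4 = rest.length / 4 * 4 + 4 := by
        simp; omega
      rw [hlen]
      have htake : (a :: b :: c :: d :: rest).take (rest.length / 4 * 4 + 4)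
          = a :: b :: c :: d :: rest.take (rest.length / 4 * 4) := by
        have : rest.length / 4 * 4 + 4 = (((rest.length / 4 * 4 + 3) + 1)) := by omega
        simp [List.take_succ_cons]
      rw [htake]
      simp only [eo, pairSums, ← ih]
      rw [Prod.mk.injEq]
      exact ⟨by ring, by ring⟩
  | case2 vs h =>
      have hlen : vs.length ≤ 3 := by
        rcases vs with _ | ⟨a, _ | ⟨b, _ | ⟨c, _ | ⟨d, t⟩⟩⟩⟩
        · simp
        · simp
        · simp
        · simp
        · exact (h a b c d t rfl).elim
      have hp : pairSums vs = (0, 0) := by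
        rcases vs with _ | ⟨a, _ | ⟨b, _ | ⟨c, _ | ⟨d, t⟩⟩⟩⟩
        · rfl
        · rfl
        · rfl
        · rfl
        · exact (h a b c d t rfl).elim
      have h0 : vs.length / 4 * 4 = 0 := by omega
      simp [h0, hp, eo]

theorem floordiv_len (n : Nat) : PySem.Int.floordiv (n : Int) 4 * 4 = ((n / 4 * 4 : Nat) : Int) := by
  rw [show PySem.Int.floordiv (n : Int) 4 = (n : Int).fdiv 4 from rfl, Int.fdiv_eq_ediv]
  simp only [show (0:Int) ≤ 4 by norm_num, true_or, if_pos]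
  omega

theorem bfold_eq0 (l : List Int) :
    (PySem.List.enumerate l 0).foldl
      (fun (s : Int × Int) iv =>
        if iv.1 % 2 == 0 then (s.1 + iv.2, s.2) else (s.1, s.2 + iv.2))
      (0, 0) = eo l := by
  rw [bfold_eq l 0 le_rfl]
  norm_num

-- ===== VERDICT (by name: the statement is the Claim_ definition above) =====
theorem total_acertos_questoes_spec : Claim_equal_total_acertos_questoes := by
  intro valores _
  unfold Spec_total_acertos_questoes total_acertos_questoes total_acertos_questoes_alt
  simp only [floordiv_len, PySem.List.slice_to_natCast, afold_eq, bfold_eq0, take_m_quads, zero_add]
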